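-- pv_equiv track=rewrite | github.com/jmoh3/TransitionTreesComplexity | old/original_tree_builder.py | findLastInversion
-- ===== SOURCE A (Python) =====
-- def findLastInversion(w):
--
--   inversions = []
--
--   for i in range(0, len(w)):
--     for j in range(i, len(w)):
--       if w[j] < w[i]:
--         inversions.append((i, j))
--
--   # Loop backwards through inversions (guarantees maximum i, then maximum j)
--   for inversion in reversed(inversions):
--     i, j = inversion[0], inversion[1]
--
--     # TODO: find the inverse of j HERE
--     j_inverse = -1
--
--     for idx in range(0, len(w)):
--       if w[idx] == j + 1:
--         j_inverse = idx
--         break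
--     j = j_inverse
--
--     pivots = findPivots(w, i, j)
--
--     # First inversion with pivots
--     if len(pivots) != 0:
--       return i, j_inverse, pivots
--
--   # No accessible inversion found
--   return None
--
-- def findPivots(w, i, j):
--   pivots = []
--
--   for h in range(0, i):
--     if w[h] < w[j]:
--       isValid = True
--       # ensure that all h' (h < h' < i ) satisfies w(h) < w(h') < w(j)
--       for hPrime in range(h, i):
--         if w[h] < w[hPrime] and w[hPrime] < w[j]:
--           isValid = False
--           break
--       if isValid:
--         pivots.append(h)
--
--   return pivots
-- ===== SOURCE B (Python) =====
-- def findLastInversion(w):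
--   n = len(w)
--   first_at = {}
--   for idx in range(n):
--     if w[idx] not in first_at:
--       first_at[w[idx]] = idx
--   for i in range(n - 1, -1, -1):
--     for j in range(n - 1, i - 1, -1):
--       if w[j] < w[i]:
--         ji = first_at.get(j + 1, -1)
--         pivots = pivotsFast(w, i, ji)
--         if pivots:
--           return i, ji, pivots
--   return None
--
-- def pivotsFast(w, i, j):
--   wj = w[j]
--   out = []
--   m = None
--   for h in range(i - 1, -1, -1):
--     if w[h] < wj:
--       if m is None or w[h] >= m:
--         out.append(h)
--       if m is None or w[h] > m:
--         m = w[h]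
--   out.reverse()
--   return out
-- ===== Notes on version B (the rewrite author's own statement) =====
-- stated objective: faster
-- what changed: B drops the materialized inversions list (it enumerates (i,j) directly in decreasing order), replaces the linear scan for the first index of value j+1 by a first-occurrence dict built once, and computes the pivot set in one backward pass maintaining a running maximum instead of the quadratic inner validity scan.
import Mathlib
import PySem

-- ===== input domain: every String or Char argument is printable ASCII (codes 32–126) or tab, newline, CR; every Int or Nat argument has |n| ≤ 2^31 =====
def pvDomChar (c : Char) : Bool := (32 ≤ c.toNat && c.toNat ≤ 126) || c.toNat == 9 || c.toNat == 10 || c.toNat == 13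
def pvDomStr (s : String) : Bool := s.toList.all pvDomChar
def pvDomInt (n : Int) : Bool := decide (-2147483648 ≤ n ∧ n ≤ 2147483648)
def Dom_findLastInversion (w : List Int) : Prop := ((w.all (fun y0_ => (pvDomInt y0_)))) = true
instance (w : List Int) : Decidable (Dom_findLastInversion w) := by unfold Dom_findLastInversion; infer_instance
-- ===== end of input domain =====

-- B replaces A's materialized inversion list, linear value-search and quadratic pivot
-- validity scan by direct descending enumeration, a first-occurrence dict and a one-pass
-- backward running-maximum pivot computation (objective: faster, asymptotic).

-- ===== PORT A =====
-- w[k] for an always-in-range (possibly -1, Python wraparound) index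
def pvGet (w : List Int) (k : Int) : Int := (PySem.List.pyGet? w k).getD 0

-- inner 'for hPrime in range(h, i): if w[h] < w[hPrime] and w[hPrime] < w[j]: isValid = False; break'
def pvValidLoop (w : List Int) (h j : Int) : List Int → Bool
  | [] => true
  | hp :: rest =>
    if pvGet w h < pvGet w hp ∧ pvGet w hp < pvGet w j then false
    else pvValidLoop w h j rest

def findPivotsA (w : List Int) (i j : Int) : List Int :=
  (PySem.List.pyRange 0 i 1).foldl (fun pivots h =>
    if pvGet w h < pvGet w j then
      (if pvValidLoop w h j (PySem.List.pyRange h i 1) then pivots ++ [h] else pivots)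
    else pivots) []

-- 'for idx in range(0, len(w)): if w[idx] == j + 1: j_inverse = idx; break'  (else -1)
def pvFirstIdx (w : List Int) (t : Int) : List Int → Int
  | [] => -1
  | idx :: rest => if pvGet w idx = t then idx else pvFirstIdx w t rest

def findInversionsA (w : List Int) : List (Int × Int) :=
  (PySem.List.pyRange 0 (w.length : Int) 1).foldl (fun inv i =>
    (PySem.List.pyRange i (w.length : Int) 1).foldl (fun inv2 j =>
      if pvGet w j < pvGet w i then inv2 ++ [(i, j)] else inv2) inv) []

def pvSearchA (w : List Int) : List (Int × Int) → Option (Int × Int × List Int)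
  | [] => none
  | (i, j) :: rest =>
    let ji := pvFirstIdx w (j + 1) (PySem.List.pyRange 0 (w.length : Int) 1)
    let pivots := findPivotsA w i ji
    if pivots.length ≠ 0 then some (i, ji, pivots) else pvSearchA w rest

def findLastInversion (w : List Int) : Option (Int × Int × List Int) :=
  pvSearchA w (findInversionsA w).reverse

-- ===== PORT B =====
-- first_at: value -> first index it occurs at
def pvFirstAt (w : List Int) : PySem.Dict Int Int :=
  (PySem.List.pyRange 0 (w.length : Int) 1).foldl (fun d idx =>
    if d.contains (pvGet w idx) then d else d.insert (pvGet w idx) idx) PySem.Dict.empty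

-- one backward pass, state (out, running max m of values < wj seen so far)
def pivotsFastB (w : List Int) (i j : Int) : List Int :=
  let wj := pvGet w j
  let r := (PySem.List.pyRange (i - 1) (-1) (-1)).foldl (fun (st : List Int × Option Int) h =>
    if pvGet w h < wj then
      ((match st.2 with
        | none => st.1 ++ [h]
        | some m => if m ≤ pvGet w h then st.1 ++ [h] else st.1),
       (match st.2 with
        | none => some (pvGet w h)
        | some m => if m < pvGet w h then some (pvGet w h) else some m))
    else st) ([], none)
  r.1.reverse

def pvSearchBj (w : List Int) (d : PySem.Dict Int Int) (i : Int) : List Int → Option (Int × Int × List Int)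
  | [] => none
  | j :: rest =>
    if pvGet w j < pvGet w i then
      let ji := d.getD (j + 1) (-1)
      let pivots := pivotsFastB w i ji
      if pivots ≠ [] then some (i, ji, pivots) else pvSearchBj w d i rest
    else pvSearchBj w d i rest

def pvSearchBi (w : List Int) (d : PySem.Dict Int Int) : List Int → Option (Int × Int × List Int)
  | [] => none
  | i :: rest =>
    match pvSearchBj w d i (PySem.List.pyRange ((w.length : Int) - 1) (i - 1) (-1)) with
    | some r => some r
    | none => pvSearchBi w d rest

def findLastInversion_alt (w : List Int) : Option (Int × Int × List Int) :=
  pvSearchBi w (pvFirstAt w) (PySem.List.pyRange ((w.length : Int) - 1) (-1) (-1))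

-- ===== PRECONDITION & SPEC =====
def Spec_findLastInversion (w : List Int) (out : Option (Int × Int × List Int)) : Prop := out = findLastInversion_alt w
instance (w : List Int) (out : Option (Int × Int × List Int)) : Decidable (Spec_findLastInversion w out) := by unfold Spec_findLastInversion; infer_instance

-- ===== CLAIM (what is proved, stated in full; the proofs are below) =====
def Claim_equal_findLastInversion : Prop := ∀ (w : List Int), Dom_findLastInversion w → Spec_findLastInversion w (findLastInversion w)

-- ===== LEMMAS AND PROOFS =====
-- proof-side helper: the shared valid-pivot test (bound a, prior running max m0)
def pvOk (w : List Int) (wj a : Int) (m0 : Option Int) (h : Int) : Bool :=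
  decide (pvGet w h < wj) &&
  (PySem.List.pyRange (h+1) (a+1) 1).all (fun h' => decide (pvGet w h' < wj → pvGet w h' ≤ pvGet w h)) &&
  (match m0 with | none => true | some m => decide (m ≤ pvGet w h))

lemma firstAt_loop (w : List Int) (t : Int) :
    ∀ (L : List Int) (d : PySem.Dict Int Int),
    (L.foldl (fun d idx => if d.contains (pvGet w idx) then d else d.insert (pvGet w idx) idx) d).getD t (-1)
      = if d.contains t then d.getD t (-1) else pvFirstIdx w t L := by
  intro L
  induction L with
  | nil =>
    intro d
    by_cases ht : d.contains t = true
    · simp [ht]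
    · simp only [Bool.not_eq_true] at ht
      simp [pvFirstIdx, ht, PySem.Dict.getD_of_not_contains d (-1) ht]
  | cons idx rest ih =>
    intro d
    simp only [List.foldl_cons, pvFirstIdx]
    by_cases hc : d.contains (pvGet w idx) = true
    · simp only [hc]
      rw [ih]
      by_cases ht : d.contains t = true
      · simp [ht]
      · have hne : ¬ pvGet w idx = t := by
          intro he; rw [he] at hc; simp [hc] at ht
        simp [ht, hne]
    · simp only [hc, if_false, Bool.false_eq_true]
      rw [ih, PySem.Dict.contains_insert, PySem.Dict.getD_insert]
      by_cases he : pvGet w idx = t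
      · subst he
        simp only [Bool.not_eq_true] at hc
        simp [hc]
      · have h1 : (t == pvGet w idx) = false := by simp [Ne.symm he]
        simp [h1, he, Ne.symm he]

lemma validLoop_eq (w : List Int) (h j : Int) :
    ∀ L, pvValidLoop w h j L
      = decide (∀ hp ∈ L, pvGet w hp < pvGet w j → pvGet w hp ≤ pvGet w h) := by
  intro L
  induction L with
  | nil => simp [pvValidLoop]
  | cons hp rest ih =>
    simp only [pvValidLoop, ih]
    by_cases hc : pvGet w h < pvGet w hp ∧ pvGet w hp < pvGet w j
    · simp only [hc]
      have hno : ¬ (∀ x ∈ hp :: rest, pvGet w x < pvGet w j → pvGet w x ≤ pvGet w h) := by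
        intro hall
        have := hall hp (List.mem_cons_self) hc.2
        omega
      exact (decide_eq_false hno).symm
    · simp only [hc, if_false]
      congr 1
      simp only [List.mem_cons, eq_iff_iff]
      constructor
      · intro hall x hx hlt
        rcases hx with rfl | hx
        · omega
        · exact hall x hx hlt
      · intro hall x hx hlt
        exact hall x (Or.inr hx) hlt

lemma pivotsA_filter (w : List Int) (i j : Int) :
    findPivotsA w i j
      = (PySem.List.pyRange 0 i 1).filter (fun h =>
          decide (pvGet w h < pvGet w j) && pvValidLoop w h j (PySem.List.pyRange h i 1)) := by
  unfold findPivotsA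
  have hstep : (fun (pivots : List Int) h =>
      if pvGet w h < pvGet w j then
        (if pvValidLoop w h j (PySem.List.pyRange h i 1) then pivots ++ [h] else pivots)
      else pivots)
    = (fun (acc : List Int) h =>
        if (decide (pvGet w h < pvGet w j) && pvValidLoop w h j (PySem.List.pyRange h i 1)) = true
        then acc ++ [h] else acc) := by
    funext acc h
    by_cases h1 : pvGet w h < pvGet w j
    · by_cases h2 : pvValidLoop w h j (PySem.List.pyRange h i 1) = true <;> simp [h1, h2]
    · simp [h1]
  rw [hstep, PySem.List.foldl_append_if_eq_filter]
  simp

lemma pvOk_iff (w : List Int) (wj a : Int) (m0 : Option Int) (h : Int) :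
    pvOk w wj a m0 h = true ↔
      (pvGet w h < wj ∧ (∀ h', h < h' → h' ≤ a → pvGet w h' < wj → pvGet w h' ≤ pvGet w h)
        ∧ (∀ m, m0 = some m → m ≤ pvGet w h)) := by
  cases m0 with
  | none =>
    simp only [pvOk, Bool.and_true, Bool.and_eq_true, decide_eq_true_eq, List.all_eq_true,
      PySem.List.mem_pyRange_one]
    constructor
    · rintro ⟨h1, h2⟩
      exact ⟨h1, fun h' u v hw => h2 h' ⟨by omega, by omega⟩ hw, fun m hm => by cases hm⟩
    · rintro ⟨h1, h2, _⟩
      exact ⟨h1, fun x hx hw => h2 x (by omega) (by omega) hw⟩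
  | some m =>
    simp only [pvOk, Bool.and_eq_true, decide_eq_true_eq, List.all_eq_true,
      PySem.List.mem_pyRange_one, Option.some.injEq]
    constructor
    · rintro ⟨⟨h1, h2⟩, h3⟩
      exact ⟨h1, fun h' u v hw => h2 h' ⟨by omega, by omega⟩ hw, fun m' hm => by cases hm; exact h3⟩
    · rintro ⟨h1, h2, h3⟩
      exact ⟨⟨h1, fun x hx hw => h2 x (by omega) (by omega) hw⟩, h3 m rfl⟩

lemma pvOk_self (w : List Int) (wj a : Int) (m0 : Option Int) :
    pvOk w wj a m0 a
      = (decide (pvGet w a < wj) &&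
          (match m0 with | none => true | some m => decide (m ≤ pvGet w a))) := by
  cases m0 <;> simp [pvOk, PySem.List.pyRange_one_eq_nil (le_refl (a+1))]

lemma pvOk_shift (w : List Int) (wj a : Int) (m0 m0' : Option Int)
    (hm0' : m0' = (if pvGet w a < wj then
        (match m0 with
          | none => some (pvGet w a)
          | some m => if m < pvGet w a then some (pvGet w a) else some m)
      else m0))
    (h : Int) (hh : h < a) :
    pvOk w wj (a-1) m0' h = pvOk w wj a m0 h := by
  rw [Bool.eq_iff_iff, pvOk_iff, pvOk_iff]
  by_cases hw : pvGet w a < wj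
  · simp only [hw, if_true] at hm0'
    constructor
    · rintro ⟨h1, h2, h3⟩
      refine ⟨h1, fun h' u v hv => ?_, fun m hm => ?_⟩
      · by_cases hva : h' = a
        · subst hva
          rcases hm : m0 with _ | m
          · exact h3 (pvGet w h') (by simp only [hm] at hm0'; rw [hm0'])
          · by_cases hma : m < pvGet w h'
            · exact h3 (pvGet w h') (by simp only [hm] at hm0'; rw [hm0']; simp [hma])
            · have := h3 m (by simp only [hm] at hm0'; rw [hm0']; simp [hma]); omega
        · exact h2 h' u (by omega) hv
      · simp only [hm] at hm0'
        by_cases hma : m < pvGet w a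
        · have := h3 (pvGet w a) (by rw [hm0']; simp [hma]); omega
        · exact h3 m (by rw [hm0']; simp [hma])
    · rintro ⟨h1, h2, h3⟩
      refine ⟨h1, fun h' u v hv => h2 h' u (by omega) hv, fun m hm => ?_⟩
      rw [hm0'] at hm
      rcases hmm : m0 with _ | m'
      · rw [hmm] at hm; cases hm
        exact h2 a (by omega) (by omega) hw
      · rw [hmm] at hm
        by_cases hma : m' < pvGet w a
        · simp only [hma, if_true] at hm; cases hm
          exact h2 a (by omega) (by omega) hw
        · simp only [hma, if_false] at hm; cases hm
          exact h3 m (by rw [hmm])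
  · simp only [hw, if_false] at hm0'
    subst hm0'
    constructor
    · rintro ⟨h1, h2, h3⟩
      refine ⟨h1, fun h' u v hv => ?_, h3⟩
      by_cases hva : h' = a
      · subst hva; omega
      · exact h2 h' u (by omega) hv
    · rintro ⟨h1, h2, h3⟩
      exact ⟨h1, fun h' u v hv => h2 h' u (by omega) hv, h3⟩

lemma pivB_step (w : List Int) (wj a : Int) (h0 : 0 ≤ a) (m0 m0' : Option Int)
    (out0 out0' : List Int)
    (hm0' : m0' = (if pvGet w a < wj then
        (match m0 with
          | none => some (pvGet w a)
          | some m => if m < pvGet w a then some (pvGet w a) else some m)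
      else m0))
    (hout0' : out0' = (if pvOk w wj a m0 a then out0 ++ [a] else out0)) :
    out0' ++ ((PySem.List.pyRange 0 a 1).filter (pvOk w wj (a-1) m0')).reverse
      = out0 ++ ((PySem.List.pyRange 0 (a+1) 1).filter (pvOk w wj a m0)).reverse := by
  rw [PySem.List.pyRange_one_succ_right h0, List.filter_append, List.reverse_append]
  have hcong : (PySem.List.pyRange 0 a 1).filter (pvOk w wj (a-1) m0')
             = (PySem.List.pyRange 0 a 1).filter (pvOk w wj a m0) := by
    apply List.filter_congr
    intro h hmem
    rw [PySem.List.mem_pyRange_one] at hmem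
    exact pvOk_shift w wj a m0 m0' hm0' h (by omega)
  rw [hcong, hout0']
  by_cases hA : pvOk w wj a m0 a = true
  · simp [List.filter, hA]
  · simp only [Bool.not_eq_true] at hA
    simp [List.filter, hA]

lemma pivB_loop (w : List Int) (wj : Int) :
    ∀ (n : Nat) (a : Int), a < n → ∀ (out0 : List Int) (m0 : Option Int),
    ((PySem.List.pyRange a (-1) (-1)).foldl (fun (st : List Int × Option Int) h =>
      if pvGet w h < wj then
        ((match st.2 with
          | none => st.1 ++ [h]
          | some m => if m ≤ pvGet w h then st.1 ++ [h] else st.1),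
         (match st.2 with
          | none => some (pvGet w h)
          | some m => if m < pvGet w h then some (pvGet w h) else some m))
      else st) (out0, m0)).1
    = out0 ++ ((PySem.List.pyRange 0 (a+1) 1).filter (pvOk w wj a m0)).reverse := by
  intro n
  induction n with
  | zero =>
    intro a ha out0 m0
    rw [PySem.List.pyRange_neg_one_eq_nil (by omega), PySem.List.pyRange_one_eq_nil (by omega)]
    simp
  | succ n ih =>
    intro a ha out0 m0
    by_cases h0 : a < 0
    · rw [PySem.List.pyRange_neg_one_eq_nil (by omega), PySem.List.pyRange_one_eq_nil (by omega)]
      simp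
    · have h0 : (0:Int) ≤ a := by omega
      rw [PySem.List.pyRange_neg_one_cons (show (-1:Int) < a by omega)]
      simp only [List.foldl_cons]
      have ea : a - 1 + 1 = a := by omega
      rcases m0 with _ | m
      · by_cases hw : pvGet w a < wj
        · simp only [hw, if_true]
          rw [ih (a-1) (by omega), ea]
          exact pivB_step w wj a h0 none (some (pvGet w a)) out0 (out0 ++ [a])
            (by simp [hw]) (by rw [pvOk_self]; simp [hw])
        · simp only [hw, if_false]
          rw [ih (a-1) (by omega), ea]
          exact pivB_step w wj a h0 none none out0 out0
            (by simp [hw]) (by rw [pvOk_self]; simp [hw])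
      · by_cases hw : pvGet w a < wj
        · by_cases hm2 : m < pvGet w a
          · have hm1 : m ≤ pvGet w a := by omega
            simp only [hw, if_true, hm1, hm2]
            rw [ih (a-1) (by omega), ea]
            exact pivB_step w wj a h0 (some m) (some (pvGet w a)) out0 (out0 ++ [a])
              (by simp [hw, hm2]) (by rw [pvOk_self]; simp [hw, hm1])
          · by_cases hm1 : m ≤ pvGet w a
            · simp only [hw, if_true, hm1, hm2]
              rw [ih (a-1) (by omega), ea]
              exact pivB_step w wj a h0 (some m) (some m) out0 (out0 ++ [a])
                (by simp [hw, hm2]) (by rw [pvOk_self]; simp [hw, hm1])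
            · simp only [hw, if_true, hm1, hm2]
              rw [ih (a-1) (by omega), ea]
              exact pivB_step w wj a h0 (some m) (some m) out0 out0
                (by simp [hw, hm2]) (by rw [pvOk_self]; simp [hw, hm1])
        · simp only [hw, if_false]
          rw [ih (a-1) (by omega), ea]
          exact pivB_step w wj a h0 (some m) (some m) out0 out0
            (by simp [hw]) (by rw [pvOk_self]; simp [hw])

lemma pivots_eq (w : List Int) (i j : Int) :
    findPivotsA w i j = pivotsFastB w i j := by
  simp only [pivotsFastB]
  rw [pivB_loop w (pvGet w j) (i.toNat + 1) (i-1) (by omega)]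
  simp only [List.nil_append, List.reverse_reverse]
  rw [show i - 1 + 1 = i by omega, pivotsA_filter]
  apply List.filter_congr
  intro h hmem
  rw [PySem.List.mem_pyRange_one] at hmem
  rw [validLoop_eq, Bool.eq_iff_iff, pvOk_iff]
  simp only [Bool.and_eq_true, decide_eq_true_eq]
  constructor
  · rintro ⟨h1, h2⟩
    refine ⟨h1, fun h' u v hv => h2 h' (by rw [PySem.List.mem_pyRange_one]; omega) hv, fun m hm => by cases hm⟩
  · rintro ⟨h1, h2, _⟩
    refine ⟨h1, fun hp hmem' hv => ?_⟩
    rw [PySem.List.mem_pyRange_one] at hmem'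
    by_cases hph : hp = h
    · subst hph; omega
    · exact h2 hp (by omega) (by omega) hv

lemma firstIdx_eq_dict (w : List Int) (t : Int) :
    pvFirstIdx w t (PySem.List.pyRange 0 (w.length : Int) 1) = (pvFirstAt w).getD t (-1) := by
  unfold pvFirstAt
  rw [firstAt_loop]
  simp [PySem.Dict.contains_empty]

lemma searchA_append (w : List Int) (l1 l2 : List (Int × Int)) :
    pvSearchA w (l1 ++ l2)
      = match pvSearchA w l1 with
        | some r => some r
        | none => pvSearchA w l2 := by
  induction l1 with
  | nil => simp [pvSearchA]
  | cons p rest ih =>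
    rcases p with ⟨i, j⟩
    simp only [List.cons_append, pvSearchA]
    by_cases hc : (findPivotsA w i (pvFirstIdx w (j + 1) (PySem.List.pyRange 0 (w.length : Int) 1))).length ≠ 0
    · simp [hc]
    · simp [hc, ih]

lemma searchBj_eq (w : List Int) (i : Int) :
    ∀ js, pvSearchBj w (pvFirstAt w) i js
      = pvSearchA w ((js.filter (fun j => decide (pvGet w j < pvGet w i))).map (fun j => (i, j))) := by
  intro js
  induction js with
  | nil => rfl
  | cons j rest ih =>
    by_cases hc : pvGet w j < pvGet w i
    · simp only [List.filter_cons, hc, decide_true, if_true, List.map_cons]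
      simp only [pvSearchBj, pvSearchA, hc, if_true, firstIdx_eq_dict, pivots_eq,
        ne_eq, List.length_eq_zero_iff]
      by_cases hp : pivotsFastB w i ((pvFirstAt w).getD (j + 1) (-1)) = []
      · simp only [hp, not_true_eq_false, if_false, ih]
      · simp only [hp, not_false_eq_true, if_true]
    · simp only [List.filter_cons, hc, decide_false, Bool.false_eq_true, if_false]
      simp only [pvSearchBj, hc, if_false, ih]

lemma searchBi_eq (w : List Int) :
    ∀ is_, pvSearchBi w (pvFirstAt w) is_
      = pvSearchA w (is_.flatMap (fun i =>
          ((PySem.List.pyRange ((w.length : Int) - 1) (i - 1) (-1)).filter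
              (fun j => decide (pvGet w j < pvGet w i))).map (fun j => (i, j)))) := by
  intro is_
  induction is_ with
  | nil => simp [pvSearchBi, pvSearchA]
  | cons i rest ih =>
    simp only [pvSearchBi, List.flatMap_cons]
    rw [searchA_append, searchBj_eq, ih]

lemma inversionsA_flatMap (w : List Int) :
    findInversionsA w
      = (PySem.List.pyRange 0 (w.length : Int) 1).flatMap (fun i =>
          ((PySem.List.pyRange i (w.length : Int) 1).filter
              (fun j => decide (pvGet w j < pvGet w i))).map (fun j => (i, j))) := by
  unfold findInversionsA
  have hstep : (fun (inv : List (Int × Int)) (i : Int) =>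
      (PySem.List.pyRange i (w.length : Int) 1).foldl (fun inv2 j =>
        if pvGet w j < pvGet w i then inv2 ++ [(i, j)] else inv2) inv)
    = (fun (inv : List (Int × Int)) (i : Int) =>
        inv ++ ((PySem.List.pyRange i (w.length : Int) 1).filter
              (fun j => decide (pvGet w j < pvGet w i))).map (fun j => (i, j))) := by
    funext inv i
    exact PySem.List.foldl_append_ite (fun j => pvGet w j < pvGet w i) (fun j => (i, j)) _ inv
  rw [hstep, PySem.List.foldl_append_eq_flatMap]
  simp

-- ===== VERDICT (by name: the statement is the Claim_ definition above) =====
theorem findLastInversion_spec : Claim_equal_findLastInversion := by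
  intro w _
  unfold Spec_findLastInversion findLastInversion findLastInversion_alt
  rw [searchBi_eq, inversionsA_flatMap, List.reverse_flatMap]
  congr 1
  rw [show PySem.List.pyRange ((w.length : Int) - 1) (-1) (-1)
        = (PySem.List.pyRange 0 (w.length : Int) 1).reverse by
      rw [PySem.List.pyRange_neg_one_eq_reverse,
        show (-1 : Int) + 1 = 0 by norm_num,
        show (w.length : Int) - 1 + 1 = (w.length : Int) by omega]]
  congr 1
  funext i
  simp only [Function.comp_apply]
  rw [show PySem.List.pyRange ((w.length : Int) - 1) (i - 1) (-1)
        = (PySem.List.pyRange i (w.length : Int) 1).reverse by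
      rw [PySem.List.pyRange_neg_one_eq_reverse,
        show i - 1 + 1 = i by omega, show (w.length : Int) - 1 + 1 = (w.length : Int) by omega]]
  rw [List.filter_reverse, List.map_reverse]
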